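-- pv_equiv track=rewrite | github.com/StijnVanNieuwpoort/Lingobot | Game/evaluation.py | calc_bad_letters
-- ===== SOURCE A (Python) =====
-- def yellow_letters(word_score):
--     """
--     Calculates all the yellow letters in word_score.
--     :param word_score: Score for a word returned by evaluate_word()
--     :return: List: Filled with the yellow characters in word_score
--     """
--     yellows = []
--     for char in word_score:
--         if char[1] == "yellow":
--             yellows.append(char[0])
--     return yellows
--
-- def calc_bad_letters(word_score, prev_bad_letters):
--     """
--     Calculates impossible letters for every position of the word.
--     :param word_score: Score for a word returned by evaluate_word()
--     :param prev_bad_letters: (List): Output of calc_bad_letters() of previous round.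
--     :return: List: With lists on every index of word filled with impossible characters for the position.
--     """
--     # If prev_bad_letters doesn't exist yet because of first round. Creates it.
--     if not prev_bad_letters:
--         prev_bad_letters = [[] for _ in range(len(word_score))]
--     new_bad_letters = prev_bad_letters
--
--     for index, char in enumerate(word_score):
--         # If character score equals empty string. Puts the corresponding character as bad letter in every position.
--         if char[1] == "":
--             for bad_letters in new_bad_letters:
--                 # If the bad letter was not already there or if the bad_letter is a yellow in the word, don't add it.
--                 if char[0] not in bad_letters and char[0] not in yellow_letters(word_score):
--                     bad_letters.append(char[0])
--         # If character score equals yellow. Puts the corresponding character as bad letter on that position.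
--         if char[1] == "yellow":
--             if char[0] not in new_bad_letters[index]:
--                 new_bad_letters[index].append(char[0])
--
--     # If character score equals red. Clears that position of all bad letters.
--     for char, bad_letters in zip(word_score, new_bad_letters):
--         if char[1] == "red":
--             bad_letters.clear()
--
--     return new_bad_letters
-- ===== SOURCE B (Python) =====
-- def calc_bad_letters(word_score, prev_bad_letters):
--     # One decide-per-position pass: precompute yellow letters and red positions,
--     # then finalize each position's list directly (mutates prev_bad_letters in place, like A).
--     if not prev_bad_letters:
--         prev_bad_letters = [[] for _ in word_score]
--     yellows = {c for c, s in word_score if s == "yellow"}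
--     reds = {p for p, (c, s) in enumerate(word_score) if s == "red"}
--     for p, bad in enumerate(prev_bad_letters):
--         if p in reds:
--             bad.clear()
--         else:
--             for i, (c, s) in enumerate(word_score):
--                 if s == "" and c not in yellows and c not in bad:
--                     bad.append(c)
--                 elif s == "yellow" and i == p and c not in bad:
--                     bad.append(c)
--     return prev_bad_letters
-- ===== Notes on version B (the rewrite author's own statement) =====
-- stated objective: alternative
-- what changed: A builds bad letters with a broadcast-into-every-list loop plus an index-targeted yellow append and then a second zip pass that clears red positions; B precomputes the yellow-letter set and the red-position set once and makes one decision per position, emitting [] for red positions and otherwise filling that one list in a single scan.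
import Mathlib
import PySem

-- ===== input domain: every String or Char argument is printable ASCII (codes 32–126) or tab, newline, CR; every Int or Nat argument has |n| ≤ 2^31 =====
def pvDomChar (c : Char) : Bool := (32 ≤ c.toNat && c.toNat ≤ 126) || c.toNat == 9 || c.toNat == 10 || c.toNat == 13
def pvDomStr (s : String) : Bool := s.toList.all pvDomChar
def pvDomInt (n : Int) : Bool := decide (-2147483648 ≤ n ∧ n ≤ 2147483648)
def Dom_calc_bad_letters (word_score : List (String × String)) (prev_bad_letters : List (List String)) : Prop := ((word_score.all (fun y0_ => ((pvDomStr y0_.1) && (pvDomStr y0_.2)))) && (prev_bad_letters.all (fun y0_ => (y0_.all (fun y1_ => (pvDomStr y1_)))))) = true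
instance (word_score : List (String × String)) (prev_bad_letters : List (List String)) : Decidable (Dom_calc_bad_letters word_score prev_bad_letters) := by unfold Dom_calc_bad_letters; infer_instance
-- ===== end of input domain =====

-- B replaces A's build-everything-then-clear-reds two-phase structure with one decide-per-position
-- pass over precomputed yellow-letter and red-position sets (objective: alternative decomposition).
-- Both the Python A and the Python B mutate prev_bad_letters in place; the equivalence proved here
-- is about the RETURN value.

-- ===== PORT A =====
-- helper function yellow_letters from the module
def yellowLetters (word_score : List (String × String)) : List String :=
  word_score.foldl (fun yellows ch => if ch.2 == "yellow" then yellows ++ [ch.1] else yellows) []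

-- the body of A's first loop (one iteration of `for index, char in enumerate(word_score)`)
def stepA (word_score : List (String × String)) (nbl : List (List String)) (ic : Int × (String × String)) : List (List String) :=
  let nbl2 := if ic.2.2 == "" then
      nbl.map (fun bad => if !bad.contains ic.2.1 && !(yellowLetters word_score).contains ic.2.1 then bad ++ [ic.2.1] else bad)
    else nbl
  if ic.2.2 == "yellow" then
    if !(PySem.List.pyGetD nbl2 ic.1 []).contains ic.2.1 then
      PySem.List.pySetD nbl2 ic.1 ((PySem.List.pyGetD nbl2 ic.1 []) ++ [ic.2.1])
    else nbl2
  else nbl2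

-- A's final loop: `for char, bad_letters in zip(word_score, new_bad_letters): if red: clear()`
def clearReds : List (String × String) → List (List String) → List (List String)
  | [], bls => bls
  | _ :: _, [] => []
  | ch :: chs, bad :: bls => (if ch.2 == "red" then [] else bad) :: clearReds chs bls

def calc_bad_letters (word_score : List (String × String)) (prev_bad_letters : List (List String)) : List (List String) :=
  let prev' := if prev_bad_letters = [] then (List.range word_score.length).map (fun _ => ([] : List String)) else prev_bad_letters
  clearReds word_score ((PySem.List.enumerate word_score).foldl (stepA word_score) prev')

-- ===== PORT B =====
-- the body of B's inner loop (one iteration of `for i, (c, s) in enumerate(word_score)`)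
def stepB (yellows : PySem.Set String) (p : Int) (bad : List String) (ic : Int × (String × String)) : List String :=
  if ic.2.2 == "" && !PySem.Set.contains yellows ic.2.1 && !bad.contains ic.2.1 then bad ++ [ic.2.1]
  else if ic.2.2 == "yellow" && ic.1 == p && !bad.contains ic.2.1 then bad ++ [ic.2.1]
  else bad

def calc_bad_letters_alt (word_score : List (String × String)) (prev_bad_letters : List (List String)) : List (List String) :=
  let prev' := if prev_bad_letters = [] then word_score.map (fun _ => ([] : List String)) else prev_bad_letters
  let yellows : PySem.Set String := PySem.Set.ofList ((word_score.filter (fun ch => ch.2 == "yellow")).map (fun ch => ch.1))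
  let reds : PySem.Set Int := PySem.Set.ofList (((PySem.List.enumerate word_score).filter (fun ic => ic.2.2 == "red")).map (fun ic => ic.1))
  (PySem.List.enumerate prev').map (fun pb =>
    if PySem.Set.contains reds pb.1 then []
    else (PySem.List.enumerate word_score).foldl (stepB yellows pb.1) pb.2)

-- ===== PRECONDITION & SPEC =====
-- Pre_ excludes only the inputs where A raises IndexError: a nonempty prev_bad_letters shorter
-- than the position of some yellow-scored letter.
def Pre_calc_bad_letters (word_score : List (String × String)) (prev_bad_letters : List (List String)) : Prop :=
  prev_bad_letters = [] ∨ ∀ ic ∈ PySem.List.enumerate word_score, ic.2.2 = "yellow" → ic.1 < (prev_bad_letters.length : Int)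
instance (word_score : List (String × String)) (prev_bad_letters : List (List String)) : Decidable (Pre_calc_bad_letters word_score prev_bad_letters) := by unfold Pre_calc_bad_letters; infer_instance

def pvWitness_calc_bad_letters : (List (String × String)) × List (List String) :=
  ([("a", "yellow"), ("b", "")], [["c"], []])

def Spec_calc_bad_letters (word_score : List (String × String)) (prev_bad_letters : List (List String)) (out : List (List String)) : Prop := out = calc_bad_letters_alt word_score prev_bad_letters
instance (word_score : List (String × String)) (prev_bad_letters : List (List String)) (out : List (List String)) : Decidable (Spec_calc_bad_letters word_score prev_bad_letters out) := by unfold Spec_calc_bad_letters; infer_instance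

-- ===== CLAIM (what is proved, stated in full; the proofs are below) =====
def Claim_equal_calc_bad_letters : Prop := ∀ (word_score : List (String × String)) (prev_bad_letters : List (List String)), Dom_calc_bad_letters word_score prev_bad_letters → Pre_calc_bad_letters word_score prev_bad_letters → Spec_calc_bad_letters word_score prev_bad_letters (calc_bad_letters word_score prev_bad_letters)

-- ===== LEMMAS AND PROOFS =====

-- Bool test for "position p of word_score is red" (proof-side view of B's `reds` set)
def redAt (word_score : List (String × String)) (p : Int) : Bool :=
  (PySem.List.enumerate word_score).any (fun ic => ic.1 == p && ic.2.2 == "red")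

lemma length_stepA (ws0 : List (String × String)) (nbl : List (List String)) (ic : Int × (String × String)) :
    (stepA ws0 nbl ic).length = nbl.length := by
  unfold stepA
  split_ifs <;> simp <;> split_ifs <;> simp [PySem.List.length_pySetD]

lemma length_clearReds (ws0 : List (String × String)) (bls : List (List String)) :
    (clearReds ws0 bls).length = bls.length := by
  induction ws0 generalizing bls with
  | nil => simp [clearReds]
  | cons ch chs ih => cases bls with
    | nil => simp [clearReds]
    | cons bad bls => simp [clearReds, ih]

lemma getElem_clearReds (ws0 : List (String × String)) (bls : List (List String)) (k : Nat) (hk : k < bls.length) :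
    (clearReds ws0 bls)[k]'(by rw [length_clearReds]; exact hk)
      = if (ws0[k]?.elim false (fun c => c.2 == "red")) then [] else bls[k] := by
  induction ws0 generalizing bls k with
  | nil => simp [clearReds]
  | cons ch chs ih =>
    cases bls with
    | nil => simp at hk
    | cons bad bls =>
      cases k with
      | zero => simp [clearReds]
      | succ k => simpa [clearReds] using ih bls k (by simpa using hk)

lemma redAt_natCast (ws0 : List (String × String)) (k : Nat) :
    redAt ws0 (k : Int) = ws0[k]?.elim false (fun c => c.2 == "red") := by
  rw [Bool.eq_iff_iff]
  simp only [redAt, List.any_eq_true, PySem.List.mem_enumerate_iff]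
  constructor
  · rintro ⟨ic, ⟨j, hj, rfl⟩, hb⟩
    simp only [Bool.and_eq_true, beq_iff_eq] at hb
    obtain ⟨h1, h2⟩ := hb
    have hjk : j = k := by omega
    subst hjk
    simp [List.getElem?_eq_getElem hj, h2]
  · intro h
    by_cases hk : k < ws0.length
    · rw [List.getElem?_eq_getElem hk] at h
      simp only [Option.elim] at h
      exact ⟨((k : Int), ws0[k]), ⟨k, hk, by simp⟩, by simpa using h⟩
    · rw [List.getElem?_eq_none (by omega)] at h
      simp at h

lemma getElem_stepA (ws0 : List (String × String)) (nbl : List (List String)) (ic : Int × (String × String))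
    (h : ic.2.2 = "yellow" → 0 ≤ ic.1 ∧ ic.1 < (nbl.length : Int)) (k : Nat) (hk : k < nbl.length) :
    (stepA ws0 nbl ic)[k]'(by rw [length_stepA]; exact hk) = stepB (yellowLetters ws0) ((k : Int)) nbl[k] ic := by
  unfold stepA stepB
  by_cases he : ic.2.2 = ""
  · have hy : (ic.2.2 == "yellow") = false := by simp [he]
    simp [he, hy, PySem.Set.contains, and_comm]
  · by_cases hy : ic.2.2 = "yellow"
    · obtain ⟨h0, h1⟩ := h hy
      simp only [hy]
      have e1 : (("yellow" : String) == "") = false := rfl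
      have e2 : (("yellow" : String) == "yellow") = true := rfl
      simp only [e1, e2, Bool.false_eq_true, if_false, if_true, Bool.true_and, Bool.false_and]
      simp only [PySem.List.pyGetD_eq_getElem _ _ h0 (by simpa using h1), PySem.List.pySetD_of_nonneg _ _ h0]
      by_cases hik : ic.1 = (k : Int)
      · have htk : ic.1.toNat = k := by omega
        simp only [htk]
        by_cases hc : ic.2.1 ∈ nbl[k]
        · simp [hc, hik]
        · simp [hc, hik, List.getElem_set]
      · have htk : ic.1.toNat ≠ k := by omega
        by_cases hc : ic.2.1 ∈ nbl[ic.1.toNat]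
        · simp [hc, hik]
        · simp [hc, hik, htk, List.getElem_set]
    · have he' : (ic.2.2 == "") = false := by simp [he]
      have hy' : (ic.2.2 == "yellow") = false := by simp [hy]
      simp [he', hy']

lemma enumerate_stepA (ws0 : List (String × String)) (nbl : List (List String)) (ic : Int × (String × String))
    (h : ic.2.2 = "yellow" → 0 ≤ ic.1 ∧ ic.1 < (nbl.length : Int)) :
    PySem.List.enumerate (stepA ws0 nbl ic) 0
      = (PySem.List.enumerate nbl 0).map (fun pb => (pb.1, stepB (yellowLetters ws0) pb.1 pb.2 ic)) := by
  apply List.ext_getElem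
  · simp [PySem.List.length_enumerate, length_stepA]
  · intro k h1 h2
    have hk : k < nbl.length := by simpa [PySem.List.length_enumerate, length_stepA] using h1
    rw [PySem.List.getElem_enumerate]
    rw [List.getElem_map, PySem.List.getElem_enumerate]
    simp only [zero_add]
    exact congrArg _ (getElem_stepA ws0 nbl ic h k hk)

lemma foldA_eq (ws0 : List (String × String)) (L : List (Int × (String × String))) :
    ∀ nbl : List (List String),
    (∀ ic ∈ L, ic.2.2 = "yellow" → 0 ≤ ic.1 ∧ ic.1 < (nbl.length : Int)) →
    L.foldl (stepA ws0) nbl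
      = (PySem.List.enumerate nbl 0).map (fun pb => L.foldl (stepB (yellowLetters ws0) pb.1) pb.2) := by
  induction L with
  | nil =>
    intro nbl _
    simpa using PySem.List.map_snd_enumerate nbl 0
  | cons ic L ih =>
    intro nbl hb
    simp only [List.foldl_cons]
    rw [ih (stepA ws0 nbl ic) (by
      intro ic' hm hy
      rw [length_stepA]
      exact hb ic' (List.mem_cons_of_mem _ hm) hy)]
    rw [enumerate_stepA ws0 nbl ic (hb ic (List.mem_cons_self))]
    rw [List.map_map]
    rfl

lemma clearReds_map_enumerate (ws0 : List (String × String)) (l : List (List String)) (g : Int × List String → List String) :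
    clearReds ws0 ((PySem.List.enumerate l 0).map g)
      = (PySem.List.enumerate l 0).map (fun pb => if redAt ws0 pb.1 then [] else g pb) := by
  apply List.ext_getElem
  · simp [length_clearReds, PySem.List.length_enumerate]
  · intro k h1 h2
    have hk : k < l.length := by
      simpa [length_clearReds, PySem.List.length_enumerate] using h1
    rw [getElem_clearReds _ _ k (by simpa [PySem.List.length_enumerate] using hk)]
    simp only [List.getElem_map, PySem.List.getElem_enumerate, zero_add, redAt_natCast]

lemma redsSet_contains (ws0 : List (String × String)) (p : Int) :
    PySem.Set.contains (PySem.Set.ofList (((PySem.List.enumerate ws0).filter (fun ic => ic.2.2 == "red")).map (fun ic => ic.1))) p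
      = redAt ws0 p := by
  rw [Bool.eq_iff_iff]
  simp only [PySem.Set.contains, List.contains_iff_mem, PySem.Set.mem_ofList, List.mem_map,
    List.mem_filter, redAt, List.any_eq_true, Bool.and_eq_true, beq_iff_eq]
  constructor
  · rintro ⟨ic, ⟨hm, hr⟩, rfl⟩
    exact ⟨ic, hm, rfl, hr⟩
  · rintro ⟨ic, hm, hp, hr⟩
    exact ⟨ic, ⟨hm, hr⟩, hp⟩

lemma yellowLetters_eq (ws0 : List (String × String)) :
    yellowLetters ws0 = (ws0.filter (fun ch => ch.2 == "yellow")).map (fun ch => ch.1) := by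
  unfold yellowLetters
  simpa using PySem.List.foldl_append_if (fun ch => ch.2 == "yellow") (fun ch => ch.1) ws0 []

lemma yellowsSet_contains (ws0 : List (String × String)) (c : String) :
    PySem.Set.contains (PySem.Set.ofList ((ws0.filter (fun ch => ch.2 == "yellow")).map (fun ch => ch.1))) c
      = PySem.Set.contains (yellowLetters ws0) c := by
  rw [Bool.eq_iff_iff, yellowLetters_eq]
  simp only [PySem.Set.contains, List.contains_iff_mem, PySem.Set.mem_ofList]

lemma stepB_congr (yl yl' : PySem.Set String) (p : Int)
    (h : ∀ x, PySem.Set.contains yl x = PySem.Set.contains yl' x) :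
    stepB yl p = stepB yl' p := by
  funext bad ic
  unfold stepB
  rw [h]

theorem main_eq (ws : List (String × String)) (prev : List (List String))
    (hpre : Pre_calc_bad_letters ws prev) :
    calc_bad_letters ws prev = calc_bad_letters_alt ws prev := by
  simp only [calc_bad_letters, calc_bad_letters_alt]
  rw [show ((List.range ws.length).map (fun _ => ([] : List String))) = ws.map (fun _ => ([] : List String)) by simp [List.map_const']]
  set prev' := if prev = [] then ws.map (fun _ => ([] : List String)) else prev with hp'
  have hlen' : ∀ ic ∈ PySem.List.enumerate ws 0, ic.2.2 = "yellow" → 0 ≤ ic.1 ∧ ic.1 < (prev'.length : Int) := by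
    intro ic hm hy
    rw [PySem.List.mem_enumerate_iff] at hm
    obtain ⟨k, hk, rfl⟩ := hm
    refine ⟨by simp, ?_⟩
    by_cases hpe : prev = []
    · simp [hp', hpe]
      omega
    · cases hpre with
      | inl h => exact absurd h hpe
      | inr h =>
        have := h ((0 : Int) + k, ws[k]) (by rw [PySem.List.mem_enumerate_iff]; exact ⟨k, hk, rfl⟩) hy
        simpa [hp', hpe] using this
  rw [foldA_eq ws (PySem.List.enumerate ws) prev' hlen']
  rw [clearReds_map_enumerate]
  apply List.map_congr_left
  intro pb _
  rw [redsSet_contains]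
  rw [stepB_congr _ _ pb.1 (yellowsSet_contains ws)]

-- ===== VERDICT (by name: the statement is the Claim_ definition above) =====
theorem calc_bad_letters_spec : Claim_equal_calc_bad_letters := by
  intro ws prev _ hpre
  unfold Spec_calc_bad_letters
  exact main_eq ws prev hpre
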